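-- pv_equiv track=rewrite | github.com/qcri/HCTQA-Benchmark | scripts/score_model_responses/score_responses.py | results_to_per_dataset_results
-- ===== SOURCE A (Python) =====
-- def results_to_per_dataset_results(results):
--     # Create a dictionary to hold the results for each dataset
--     dataset_results = {}
--
--     # Iterate through the results and group them by dataset
--     for result in results:
--         dataset = result['id'].split("--")[0]
--         if dataset not in dataset_results:
--             dataset_results[dataset] = [result]
--         else:
--             dataset_results[dataset].append(result)
--     return dataset_results
-- ===== SOURCE B (Python) =====
-- def results_to_per_dataset_results(results):
--     # Two-pass: collect dataset keys in first-appearance order, then build each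
--     # group by filtering, instead of A's single hash-accumulation pass.
--     keys = list(dict.fromkeys(r['id'].split('--')[0] for r in results))
--     return {k: [r for r in results if r['id'].split('--')[0] == k] for k in keys}
-- ===== Notes on version B (the rewrite author's own statement) =====
-- stated objective: alternative
-- what changed: A builds the grouping in one hash-accumulation pass that appends to per-key lists; B first deduplicates the dataset keys in first-appearance order and then builds each group by filtering the whole result list per key.
import Mathlib
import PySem

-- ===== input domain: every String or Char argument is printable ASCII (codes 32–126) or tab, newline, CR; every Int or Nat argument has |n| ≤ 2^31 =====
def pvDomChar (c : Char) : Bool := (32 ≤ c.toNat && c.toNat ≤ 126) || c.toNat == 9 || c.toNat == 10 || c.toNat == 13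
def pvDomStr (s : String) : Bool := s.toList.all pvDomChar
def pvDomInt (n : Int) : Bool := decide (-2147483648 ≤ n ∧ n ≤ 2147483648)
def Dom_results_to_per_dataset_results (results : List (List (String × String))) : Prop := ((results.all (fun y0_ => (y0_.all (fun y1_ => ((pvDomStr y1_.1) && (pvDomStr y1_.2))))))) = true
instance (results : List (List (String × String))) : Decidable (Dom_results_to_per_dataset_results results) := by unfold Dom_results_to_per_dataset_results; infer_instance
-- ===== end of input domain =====

-- B groups by the same key with a dedup-keys-then-filter-per-key decomposition instead of A's
-- single dict-accumulation pass; equivalence of RETURN values (as insertion-ordered dicts) is proved.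

-- shared key helper: r['id'].split("--")[0] (getD "" is only reached when 'id' is missing, which Pre_ excludes)
def pvKey (r : List (String × String)) : String :=
  (((PySem.Str.split? (((PySem.Dict.mk r).get? "id").getD "") "--").getD []).headD "")

-- ===== PORT A =====
def results_to_per_dataset_results (results : List (List (String × String))) : List (String × List (List (String × String))) :=
  (results.foldl
    (fun d r =>
      let dataset := pvKey r
      if d.contains dataset = false then
        d.insert dataset [r]
      else
        d.insert dataset (d.getD dataset [] ++ [r]))
    (PySem.Dict.empty : PySem.Dict String (List (List (String × String))))).items

-- ===== PORT B =====
def results_to_per_dataset_results_alt (results : List (List (String × String))) : List (String × List (List (String × String))) :=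
  (PySem.List.dedup (results.map pvKey)).map
    (fun k => (k, results.filter (fun r => pvKey r == k)))

-- ===== PRECONDITION & SPEC =====
-- Pre_ excludes exactly the inputs where some result dict lacks the key 'id': there A raises KeyError.
def Pre_results_to_per_dataset_results (results : List (List (String × String))) : Prop :=
  (results.all (fun r => r.any (fun p => p.1 == "id"))) = true
instance (results : List (List (String × String))) : Decidable (Pre_results_to_per_dataset_results results) := by unfold Pre_results_to_per_dataset_results; infer_instance
def pvWitness_results_to_per_dataset_results : (List (List (String × String))) := [[("id", "ds--1")], [("id", "ds--2")], [("id", "e--1")]]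

def Spec_results_to_per_dataset_results (results : List (List (String × String))) (out : List (String × List (List (String × String)))) : Prop := out = results_to_per_dataset_results_alt results
instance (results : List (List (String × String))) (out : List (String × List (List (String × String)))) : Decidable (Spec_results_to_per_dataset_results results out) := by unfold Spec_results_to_per_dataset_results; infer_instance

-- ===== CLAIM (what is proved, stated in full; the proofs are below) =====
def Claim_equal_results_to_per_dataset_results : Prop := ∀ (results : List (List (String × String))), Dom_results_to_per_dataset_results results → Pre_results_to_per_dataset_results results → Spec_results_to_per_dataset_results results (results_to_per_dataset_results results)

-- ===== LEMMAS AND PROOFS =====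

-- A's loop body is the dict "modify" combinator at the element's key.
theorem pvStep_eq_modify (d : PySem.Dict String (List (List (String × String)))) (r : List (String × String)) :
    (if d.contains (pvKey r) = false then d.insert (pvKey r) [r]
     else d.insert (pvKey r) (d.getD (pvKey r) [] ++ [r]))
      = d.modify (pvKey r) [] (· ++ [r]) := by
  rcases h : d.contains (pvKey r) with _ | _
  · simp [PySem.Dict.modify, PySem.Dict.getD_of_not_contains d [] h]
  · simp [PySem.Dict.modify]

-- A's whole loop is a fold of that combinator.
theorem pvFold_eq (results : List (List (String × String)))
    (init : PySem.Dict String (List (List (String × String)))) :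
    results.foldl
      (fun d r =>
        let dataset := pvKey r
        if d.contains dataset = false then
          d.insert dataset [r]
        else
          d.insert dataset (d.getD dataset [] ++ [r]))
      init
      = results.foldl (fun d r => d.modify (pvKey r) [] (· ++ [r])) init := by
  have hfun : (fun (d : PySem.Dict String (List (List (String × String)))) r =>
      let dataset := pvKey r
      if d.contains dataset = false then
        d.insert dataset [r]
      else
        d.insert dataset (d.getD dataset [] ++ [r]))
      = fun d r => d.modify (pvKey r) [] (· ++ [r]) := by
    funext d r
    exact pvStep_eq_modify d r
  rw [hfun]

-- The modify-fold's items are exactly B's dedup-then-filter table.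
theorem pvItems_eq (results : List (List (String × String))) :
    (results.foldl (fun d r => d.modify (pvKey r) [] (· ++ [r]))
      (PySem.Dict.empty : PySem.Dict String (List (List (String × String))))).items
    = (PySem.List.dedup (results.map pvKey)).map
        (fun k => (k, results.filter (fun r => pvKey r == k))) := by
  have hnd : (results.foldl (fun d r => d.modify (pvKey r) [] (· ++ [r]))
      (PySem.Dict.empty : PySem.Dict String (List (List (String × String))))).keys.Nodup :=
    PySem.Dict.nodup_keys_foldl_modify_key results pvKey [] (fun _ r v => v ++ [r]) _ (by simp)
  rw [PySem.Dict.items_eq_map_keys _ hnd []]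
  rw [PySem.Dict.keys_foldl_modify_key results pvKey [] (fun _ r v => v ++ [r])]
  have hkeys : PySem.Set.update (PySem.Dict.empty : PySem.Dict String (List (List (String × String)))).keys (results.map pvKey)
      = PySem.List.dedup (results.map pvKey) := by
    simp [PySem.Dict.keys_empty, PySem.Set.update_nil_left]
  rw [hkeys]
  apply List.map_congr_left
  intro k _
  have hfold : results.foldl (fun d r => d.modify (pvKey r) [] (· ++ [r]))
      (PySem.Dict.empty : PySem.Dict String (List (List (String × String))))
      = (results.map (fun r => (pvKey r, r))).foldl (fun d p => d.modify p.1 [] (· ++ [p.2])) PySem.Dict.empty := by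
    rw [List.foldl_map]
  rw [hfold, PySem.Dict.getD_foldl_modify_append]
  simp [List.filter_map, Function.comp_def]

-- ===== VERDICT (by name: the statement is the Claim_ definition above) =====
theorem results_to_per_dataset_results_spec : Claim_equal_results_to_per_dataset_results := by
  intro results _ _
  unfold Spec_results_to_per_dataset_results results_to_per_dataset_results results_to_per_dataset_results_alt
  rw [pvFold_eq, pvItems_eq]
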